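-- pv_equiv track=rewrite | github.com/HeccTest/Recent-Projects | Coding Challenges/expert/wordBuckets/wordBuckets.py | split_into_buckets
-- ===== SOURCE A (Python) =====
-- def split_into_buckets(phrase, n):
-- 	returnList = []
-- 	currBucket = ""
-- 	bucketCount = 0
--
-- 	wordList = phrase.split()
-- 	i = 0
-- 	while(i <= len(wordList)):
-- 		if(i == len(wordList)):
-- 			returnList.append(currBucket)
-- 			return(returnList)
-- 		if(bucketCount == 0):
-- 			if(len(wordList[i]) <= n):
-- 				currBucket += wordList[i]
-- 				bucketCount += len(wordList[i])
-- 			else: # empty bucket, that cannot hold a word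
-- 				return([])
-- 		else:
-- 			if(len(wordList[i]) + bucketCount + 1 <= n):
-- 				currBucket += " " + wordList[i]
-- 				bucketCount += len(wordList[i]) + 1
-- 			else:
-- 				returnList.append(currBucket)
-- 				currBucket = ""
-- 				bucketCount = 0
-- 				i -= 1
-- 		i += 1
-- ===== SOURCE B (Python) =====
-- def split_into_buckets(phrase, n):
--     words = phrase.split()
--     if not words:
--         return ['']
--     # prefix sums: pre[k] = len(" ".join(words[:k])) + 1 (each word costs len+1)
--     pre = [0]
--     total = 0
--     for w in words:
--         total += len(w) + 1
--         pre.append(total)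
--     buckets = []
--     i = 0
--     while i < len(words):
--         if len(words[i]) > n:
--             return []
--         # largest lo in [i+1, len(words)] with pre[lo] <= pre[i] + n + 1, by binary search
--         target = pre[i] + n + 1
--         lo, hi = i + 1, len(words)
--         while lo < hi:
--             mid = (lo + hi + 1) // 2
--             if pre[mid] <= target:
--                 lo = mid
--             else:
--                 hi = mid - 1
--         buckets.append(" ".join(words[i:lo]))
--         i = lo
--     return buckets
-- ===== Notes on version B (the rewrite author's own statement) =====
-- stated objective: alternative
-- what changed: Replaced A's single-pass accumulator loop (index backtracking with i -= 1, running string concatenation and a character counter) by a staged algorithm: one pass builds a prefix-sum array of word costs, then each bucket boundary is found by binary search on the prefix sums and the bucket is emitted by joining a slice words[i:lo].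
import Mathlib
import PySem

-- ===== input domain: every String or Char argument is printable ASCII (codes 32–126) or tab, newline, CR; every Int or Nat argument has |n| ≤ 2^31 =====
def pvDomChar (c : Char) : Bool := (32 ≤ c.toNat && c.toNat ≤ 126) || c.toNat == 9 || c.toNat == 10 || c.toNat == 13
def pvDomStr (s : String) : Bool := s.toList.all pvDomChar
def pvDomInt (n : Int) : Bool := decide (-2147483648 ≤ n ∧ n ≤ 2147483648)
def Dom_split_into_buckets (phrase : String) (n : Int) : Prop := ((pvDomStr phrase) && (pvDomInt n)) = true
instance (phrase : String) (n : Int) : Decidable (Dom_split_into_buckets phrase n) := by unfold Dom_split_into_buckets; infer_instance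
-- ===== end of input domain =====

-- B replaces A's single-pass accumulator loop (i -= 1 backtracking, running string concat,
-- character counter) by a staged algorithm: build a prefix-sum array of word costs once, then
-- locate each bucket boundary by binary search and emit the joined slice; objective: alternative.

-- ===== PORT A =====
-- literal port of A's while loop; the fuel argument and the getD default only make the same
-- computation total: started with fuel 2*len+1 at i = 0 the fuel never runs out and the
-- default is never read (proved in loop_eq below)
def splitALoop (wordList : List String) (n : Int) (returnList : List String)
    (currBucket : String) (bucketCount : Int) (i : Nat) (fuel : Nat) : List String :=
  match fuel with
  | 0 => []
  | fuel + 1 =>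
    if wordList.length ≤ i then returnList ++ [currBucket]
    else
      if bucketCount = 0 then
        if PySem.Str.len (wordList.getD i "") ≤ n then
          splitALoop wordList n returnList (currBucket ++ wordList.getD i "")
            (bucketCount + PySem.Str.len (wordList.getD i "")) (i + 1) fuel
        else []
      else
        if PySem.Str.len (wordList.getD i "") + bucketCount + 1 ≤ n then
          splitALoop wordList n returnList (currBucket ++ " " ++ wordList.getD i "")
            (bucketCount + PySem.Str.len (wordList.getD i "") + 1) (i + 1) fuel
        else
          splitALoop wordList n (returnList ++ [currBucket]) "" 0 i fuel

def split_into_buckets (phrase : String) (n : Int) : List String :=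
  splitALoop (PySem.Str.split₀ phrase) n [] "" 0 0 (2 * (PySem.Str.split₀ phrase).length + 1)

-- ===== PORT B =====
-- `pre = [0]; total = 0; for w in words: total += len(w)+1; pre.append(total)`
def bPre (ws : List String) : List Int :=
  (ws.foldl (fun (st : List Int × Int) w =>
      (st.1 ++ [st.2 + PySem.Str.len w + 1], st.2 + PySem.Str.len w + 1)) ([0], 0)).1

-- inner `while lo < hi` binary search of Source B (indices are nonnegative, so Nat // is Python //)
def bSearch (pre : List Int) (target : Int) (lo hi : Nat) : Nat :=
  if h : lo < hi then
    if pre.getD ((lo + hi + 1) / 2) 0 ≤ target then bSearch pre target ((lo + hi + 1) / 2) hi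
    else bSearch pre target lo ((lo + hi + 1) / 2 - 1)
  else lo
termination_by hi - lo
decreasing_by all_goals omega

-- outer `while i < len(words)` of Source B; the fuel only makes the loop total: each iteration
-- advances i by at least 1, so fuel = len(words) never runs out (proved in chunk_eq below)
def bGo (ws : List String) (pre : List Int) (n : Int) (buckets : List String)
    (i : Nat) (fuel : Nat) : List String :=
  match fuel with
  | 0 => buckets
  | fuel + 1 =>
    if i < ws.length then
      if n < PySem.Str.len (ws.getD i "") then []
      else
        bGo ws pre n
          (buckets ++ [PySem.Str.join " " (PySem.List.slice ws (some (i : Int))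
            (some ((bSearch pre (pre.getD i 0 + n + 1) (i + 1) ws.length : Nat) : Int)))])
          (bSearch pre (pre.getD i 0 + n + 1) (i + 1) ws.length) fuel
    else buckets

def split_into_buckets_alt (phrase : String) (n : Int) : List String :=
  let words := PySem.Str.split₀ phrase
  if words = [] then [""]
  else bGo words (bPre words) n [] 0 words.length

-- ===== PRECONDITION & SPEC =====
def Spec_split_into_buckets (phrase : String) (n : Int) (out : List String) : Prop := out = split_into_buckets_alt phrase n
instance (phrase : String) (n : Int) (out : List String) : Decidable (Spec_split_into_buckets phrase n out) := by unfold Spec_split_into_buckets; infer_instance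

-- ===== CLAIM (what is proved, stated in full; the proofs are below) =====
def Claim_equal_split_into_buckets : Prop := ∀ (phrase : String) (n : Int), Dom_split_into_buckets phrase n → Spec_split_into_buckets phrase n (split_into_buckets phrase n)

-- ===== LEMMAS AND PROOFS =====

-- proof-side middle model: A's loop reshaped as a word-list accumulator loop (bridge between
-- A's index/concat loop and B's prefix-sum chunking)
def midLoop (n : Int) (words : List String) (result : List String)
    (current : List String) (length : Int) : List String :=
  match words with
  | [] => result ++ [PySem.Str.join " " current]
  | word :: rest =>
    if current = [] then
      if n < PySem.Str.len word then []
      else midLoop n rest result [word] (PySem.Str.len word)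
    else if length + 1 + PySem.Str.len word ≤ n then
      midLoop n rest result (current ++ [word]) (length + 1 + PySem.Str.len word)
    else
      if n < PySem.Str.len word then []
      else midLoop n rest (result ++ [PySem.Str.join " " current]) [word] (PySem.Str.len word)

-- " ".join of no words is the empty string
lemma join_nil_str : PySem.Str.join " " [] = "" := by
  apply String.toList_inj.mp
  simp [PySem.Str.toList_join, PySem.Chars.join_nil]

-- " ".join of one word is that word
lemma join_singleton_str (w : String) : PySem.Str.join " " [w] = w := by
  apply String.toList_inj.mp
  simp [PySem.Str.toList_join, PySem.Chars.join_singleton]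

-- chars-level: appending one more part to a nonempty join
lemma chars_join_append (sep w : List Char) (c : List (List Char)) (hc : c ≠ []) :
    PySem.Chars.join sep (c ++ [w]) = PySem.Chars.join sep c ++ sep ++ w := by
  induction c with
  | nil => exact absurd rfl hc
  | cons c0 cs ih =>
    cases cs with
    | nil => simp [PySem.Chars.join_cons_cons, PySem.Chars.join_singleton]
    | cons c1 cs' =>
      simp only [List.cons_append]
      rw [PySem.Chars.join_cons_cons]
      simp only [List.cons_append] at ih
      rw [ih (by simp), PySem.Chars.join_cons_cons]
      simp [List.append_assoc]

-- string-level: A's `currBucket + " " + word` is the join of `current ++ [word]`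
lemma join_append_str (w : String) (c : List String) (hc : c ≠ []) :
    PySem.Str.join " " (c ++ [w]) = PySem.Str.join " " c ++ " " ++ w := by
  apply String.toList_inj.mp
  simp only [String.toList_append, PySem.Str.toList_join, List.map_append, List.map_cons,
    List.map_nil]
  exact chars_join_append _ _ _ (by simpa using hc)

-- the length counter after appending one more word
lemma len_join_append (w : String) (c : List String) (hc : c ≠ []) :
    PySem.Str.len (PySem.Str.join " " (c ++ [w]))
      = PySem.Str.len (PySem.Str.join " " c) + 1 + PySem.Str.len w := by
  rw [join_append_str w c hc]
  simp [PySem.Str.len_eq]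
  omega

-- a nonempty bucket of nonempty words has nonzero joined length
lemma len_join_ne_zero (c0 : String) (cs : List String) (h0 : c0.toList ≠ []) :
    PySem.Str.len (PySem.Str.join " " (c0 :: cs)) ≠ 0 := by
  have : ∃ r, (PySem.Str.join " " (c0 :: cs)).toList = c0.toList ++ r := by
    cases cs with
    | nil => exact ⟨[], by simp [PySem.Str.toList_join, PySem.Chars.join_singleton]⟩
    | cons c1 cs' =>
      refine ⟨" ".toList ++ PySem.Chars.join " ".toList (List.map String.toList (c1 :: cs')), ?_⟩
      simp [PySem.Str.toList_join, PySem.Chars.join_cons_cons, List.append_assoc]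
  obtain ⟨r, hr⟩ := this
  have hlen : (PySem.Str.join " " (c0 :: cs)).toList.length = c0.toList.length + r.length := by
    rw [hr, List.length_append]
  have h0' : 0 < c0.toList.length := List.length_pos_iff.mpr h0
  simp only [PySem.Str.len_eq]
  omega

-- every word produced by Python's str.split() is nonempty
lemma split₀_go_ne_nil : ∀ (cs cur acc : _), (∀ a ∈ acc, a ≠ ([] : List Char)) →
    ∀ w ∈ PySem.Chars.split₀.go cs cur acc, w ≠ [] := by
  intro cs
  induction cs with
  | nil =>
    intro cur acc hacc w hwm
    simp only [PySem.Chars.split₀.go] at hwm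
    by_cases hcur : cur.isEmpty
    · rw [if_pos hcur] at hwm
      exact hacc w (List.mem_reverse.mp hwm)
    · rw [if_neg hcur] at hwm
      rcases List.mem_cons.mp (List.mem_reverse.mp hwm) with h | h
      · subst h
        simp only [ne_eq, List.reverse_eq_nil_iff]
        intro hnil
        exact hcur (by simp [hnil])
      · exact hacc w h
  | cons c rest ih =>
    intro cur acc hacc w hwm
    simp only [PySem.Chars.split₀.go] at hwm
    by_cases hsp : PySem.Chars.isspace c
    · rw [if_pos hsp] at hwm
      by_cases hcur : cur.isEmpty
      · rw [if_pos hcur] at hwm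
        exact ih [] acc hacc w hwm
      · rw [if_neg hcur] at hwm
        refine ih [] _ ?_ w hwm
        intro a ha
        rcases List.mem_cons.mp ha with h | h
        · subst h
          simp only [ne_eq, List.reverse_eq_nil_iff]
          intro hnil
          exact hcur (by simp [hnil])
        · exact hacc a h
    · rw [if_neg hsp] at hwm
      exact ih (c :: cur) acc hacc w hwm

lemma split₀_words_ne_nil (s : String) : ∀ w ∈ PySem.Str.split₀ s, w.toList ≠ [] := by
  intro w hw
  have hmem : w.toList ∈ PySem.Chars.split₀ s.toList := by
    rw [← PySem.Str.split₀_map_toList]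
    exact List.mem_map_of_mem hw
  exact split₀_go_ne_nil s.toList [] [] (by simp) _ hmem

-- A's loop agrees with midLoop under the invariant that A's currBucket is the join of
-- midLoop's current word list and bucketCount is its length (A's fuel is never exhausted)
lemma loop_eq (wl : List String) (n : Int) (hw : ∀ w ∈ wl, w.toList ≠ []) :
    ∀ k i fuel, wl.length - i = k → i ≤ wl.length → 2 * k + 1 ≤ fuel →
    ∀ (result : List String) (current : List String),
      (∀ w ∈ current, w.toList ≠ []) →
      splitALoop wl n result (PySem.Str.join " " current)
          (PySem.Str.len (PySem.Str.join " " current)) i fuel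
        = midLoop n (wl.drop i) result current
            (PySem.Str.len (PySem.Str.join " " current)) := by
  intro k
  induction k with
  | zero =>
    intro i fuel hk hi hfuel result current hc
    obtain ⟨f, rfl⟩ : ∃ f, fuel = f + 1 := ⟨fuel - 1, by omega⟩
    have hi' : i = wl.length := by omega
    rw [splitALoop]
    simp [hi', midLoop]
  | succ k ih =>
    intro i fuel hk hi hfuel result current hc
    obtain ⟨f, rfl⟩ : ∃ f, fuel = f + 1 := ⟨fuel - 1, by omega⟩
    have hlt : i < wl.length := by omega
    have hdrop : wl.drop i = wl[i] :: wl.drop (i + 1) := List.drop_eq_getElem_cons hlt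
    have hget : wl.getD i "" = wl[i] := List.getD_eq_getElem wl "" hlt
    have hwi : wl[i].toList ≠ [] := hw _ (List.getElem_mem hlt)
    have hz : PySem.Str.len "" = 0 := by simp [PySem.Str.len_eq]
    rw [hdrop]
    cases current with
    | nil =>
      rw [splitALoop, if_neg (show ¬ wl.length ≤ i by omega)]
      simp only [join_nil_str, hget]
      rw [if_pos hz, hz]
      simp only [midLoop]
      simp only [if_true]
      by_cases hfit : PySem.Str.len wl[i] ≤ n
      · rw [if_pos hfit, if_neg (show ¬ n < PySem.Str.len wl[i] by omega)]
        have := ih (i + 1) f (by omega) (by omega) (by omega) result [wl[i]] (by simpa using hwi)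
        rw [join_singleton_str] at this
        simpa [String.empty_append, hz] using this
      · rw [if_neg hfit, if_pos (show n < PySem.Str.len wl[i] by omega)]
    | cons c0 cs =>
      have hnz : PySem.Str.len (PySem.Str.join " " (c0 :: cs)) ≠ 0 :=
        len_join_ne_zero c0 cs (hc c0 (by simp))
      rw [splitALoop, if_neg (show ¬ wl.length ≤ i by omega), if_neg hnz]
      simp only [hget, midLoop]
      rw [if_neg (show ¬ (c0 :: cs = []) by simp)]
      by_cases hfit : PySem.Str.len (PySem.Str.join " " (c0 :: cs)) + 1 + PySem.Str.len wl[i] ≤ n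
      · rw [if_pos (show PySem.Str.len wl[i] + PySem.Str.len (PySem.Str.join " " (c0 :: cs)) + 1 ≤ n by omega),
          if_pos hfit]
        have harith : PySem.Str.len (PySem.Str.join " " (c0 :: cs)) + PySem.Str.len wl[i] + 1
            = PySem.Str.len (PySem.Str.join " " (c0 :: cs)) + 1 + PySem.Str.len wl[i] := by ring
        rw [harith]
        have hx := ih (i + 1) f (by omega) (by omega) (by omega) result ((c0 :: cs) ++ [wl[i]])
          (by
            intro w hwmem
            rcases List.mem_append.mp hwmem with h | h
            · exact hc w h
            · rw [List.mem_singleton.mp h]; exact hwi)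
        have e2 : PySem.Str.len (PySem.Str.join " " ((c0 :: cs) ++ [wl[i]]))
            = PySem.Str.len (PySem.Str.join " " (c0 :: cs)) + 1 + PySem.Str.len wl[i] :=
          len_join_append _ _ (by simp)
        have e1 : PySem.Str.join " " ((c0 :: cs) ++ [wl[i]])
            = PySem.Str.join " " (c0 :: cs) ++ " " ++ wl[i] :=
          join_append_str _ _ (by simp)
        simp only [List.cons_append] at hx e1 e2 ⊢
        rw [e2, e1] at hx
        exact hx
      · rw [if_neg (show ¬ (PySem.Str.len wl[i] + PySem.Str.len (PySem.Str.join " " (c0 :: cs)) + 1 ≤ n) by omega),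
          if_neg hfit]
        obtain ⟨f', rfl⟩ : ∃ f', f = f' + 1 := ⟨f - 1, by omega⟩
        rw [splitALoop, if_neg (show ¬ wl.length ≤ i by omega), if_pos rfl]
        simp only [hget]
        by_cases hbig : n < PySem.Str.len wl[i]
        · rw [if_neg (show ¬ PySem.Str.len wl[i] ≤ n by omega), if_pos hbig]
        · rw [if_pos (show PySem.Str.len wl[i] ≤ n by omega), if_neg hbig]
          have := ih (i + 1) f' (by omega) (by omega) (by omega)
            (result ++ [PySem.Str.join " " (c0 :: cs)]) [wl[i]] (by simpa using hwi)
          rw [join_singleton_str] at this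
          simpa [String.empty_append] using this

-- ---- prefix sums ----

-- pre[k] as a value: sum of len(w)+1 over the first k words
def sumLen (ws : List String) (k : Nat) : Int :=
  ((ws.take k).map (fun w => PySem.Str.len w + 1)).sum

lemma sumLen_zero (ws : List String) : sumLen ws 0 = 0 := by simp [sumLen]

lemma sumLen_cons (w : String) (r : List String) (k : Nat) :
    sumLen (w :: r) (k + 1) = PySem.Str.len w + 1 + sumLen r k := by
  simp [sumLen, List.take_succ_cons]

lemma sumLen_succ (ws : List String) {k : Nat} (hk : k < ws.length) :
    sumLen ws (k + 1) = sumLen ws k + PySem.Str.len ws[k] + 1 := by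
  unfold sumLen
  rw [List.take_add_one, List.getElem?_eq_getElem hk]
  simp only [Option.toList_some, List.map_append, List.sum_append, List.map_cons, List.map_nil,
    List.sum_cons, List.sum_nil]
  ring

lemma sumLen_mono (ws : List String) {j k : Nat} (h : j ≤ k) :
    sumLen ws j ≤ sumLen ws k := by
  have hsplit : ws.take k = ws.take j ++ (ws.take k).drop j := by
    conv_lhs => rw [← List.take_append_drop j (ws.take k)]
    rw [List.take_take, min_eq_left h]
  have hnn : 0 ≤ (((ws.take k).drop j).map (fun w => PySem.Str.len w + 1)).sum := by
    apply List.sum_nonneg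
    intro x hx
    simp only [List.mem_map] at hx
    obtain ⟨w, _, rfl⟩ := hx
    have : (0 : Int) ≤ PySem.Str.len w := by simp [PySem.Str.len_eq]
    omega
  unfold sumLen
  rw [hsplit, List.map_append, List.sum_append]
  omega

lemma bPre_foldl : ∀ (ws : List String) (acc : List Int) (t : Int),
    (ws.foldl (fun (st : List Int × Int) w =>
        (st.1 ++ [st.2 + PySem.Str.len w + 1], st.2 + PySem.Str.len w + 1)) (acc, t)).1
      = acc ++ (List.range ws.length).map (fun j => t + sumLen ws (j + 1)) := by
  intro ws
  induction ws with
  | nil => intro acc t; simp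
  | cons w r ih =>
    intro acc t
    simp only [List.foldl_cons]
    rw [ih]
    simp only [List.length_cons, List.range_succ_eq_map, List.map_cons, List.map_map]
    have h1 : t + sumLen (w :: r) (0 + 1) = t + PySem.Str.len w + 1 := by
      rw [sumLen_cons, sumLen_zero]; ring
    have h2 : ((fun j => t + sumLen (w :: r) (j + 1)) ∘ Nat.succ)
        = fun j => (t + PySem.Str.len w + 1) + sumLen r (j + 1) := by
      funext j
      simp only [Function.comp_apply, Nat.succ_eq_add_one]
      rw [sumLen_cons]
      ring
    rw [h2, List.append_cons, h1]
    simp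

lemma bPre_eq (ws : List String) :
    bPre ws = 0 :: (List.range ws.length).map (fun j => sumLen ws (j + 1)) := by
  unfold bPre
  rw [bPre_foldl]
  simp

lemma bPre_getD (ws : List String) {k : Nat} (hk : k ≤ ws.length) :
    (bPre ws).getD k 0 = sumLen ws k := by
  rw [bPre_eq]
  cases k with
  | zero => simp [sumLen_zero]
  | succ k =>
    have hk' : k < ws.length := by omega
    rw [List.getD_cons_succ]
    rw [List.getD_eq_getElem _ _ (by simpa using hk')]
    simp

-- ---- binary search correctness ----

lemma bSearch_spec (ws : List String) (target : Int) :
    ∀ m lo hi, hi - lo = m → lo ≤ hi → hi ≤ ws.length → sumLen ws lo ≤ target →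
      (hi = ws.length ∨ target < sumLen ws (hi + 1)) →
      lo ≤ bSearch (bPre ws) target lo hi ∧ bSearch (bPre ws) target lo hi ≤ hi ∧
        sumLen ws (bSearch (bPre ws) target lo hi) ≤ target ∧
        (bSearch (bPre ws) target lo hi = ws.length ∨
          target < sumLen ws (bSearch (bPre ws) target lo hi + 1)) := by
  intro m
  induction m using Nat.strong_induction_on with
  | _ m ih =>
    intro lo hi hm hle hhi hlo hmax
    by_cases h : lo < hi
    · have hmid1 : lo + 1 ≤ (lo + hi + 1) / 2 := by omega
      have hmid2 : (lo + hi + 1) / 2 ≤ hi := by omega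
      rw [bSearch, dif_pos h]
      by_cases hc : (bPre ws).getD ((lo + hi + 1) / 2) 0 ≤ target
      · rw [if_pos hc]
        rw [bPre_getD ws (by omega)] at hc
        have := ih (hi - (lo + hi + 1) / 2) (by omega) ((lo + hi + 1) / 2) hi rfl
          (by omega) hhi hc hmax
        omega
      · rw [if_neg hc]
        rw [bPre_getD ws (by omega)] at hc
        push_neg at hc
        have := ih ((lo + hi + 1) / 2 - 1 - lo) (by omega) lo ((lo + hi + 1) / 2 - 1) rfl
          (by omega) (by omega) hlo
          (Or.inr (by have : (lo + hi + 1) / 2 - 1 + 1 = (lo + hi + 1) / 2 := by omega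
                      rw [this]; exact hc))
        omega
    · rw [bSearch, dif_neg h]
      have : lo = hi := by omega
      subst this
      exact ⟨le_refl _, le_refl _, hlo, hmax⟩

-- ---- chunking: midLoop equals B's prefix-sum / binary-search loop ----

lemma bGo_at_end (ws : List String) (pre : List Int) (n : Int) (B : List String)
    {i : Nat} (hi : ws.length ≤ i) : ∀ fuel, bGo ws pre n B i fuel = B := by
  intro fuel
  cases fuel with
  | zero => rfl
  | succ fuel => rw [bGo, if_neg (by omega)]

-- filling one bucket: from any partial bucket words[i:k] (i < k ≤ lo) midLoop reaches the
-- flush point lo, the greedy bucket end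
lemma fill (ws : List String) (n : Int) (i lo : Nat)
    (hilo : i < lo) (hlo : lo ≤ ws.length)
    (hfit : sumLen ws lo ≤ sumLen ws i + n + 1)
    (hmax : lo = ws.length ∨ sumLen ws i + n + 1 < sumLen ws (lo + 1)) :
    ∀ m k (B : List String), i < k → k ≤ lo → lo - k = m →
    midLoop n (ws.drop k) B ((ws.drop i).take (k - i)) (sumLen ws k - sumLen ws i - 1)
      = (if lo = ws.length then B ++ [PySem.Str.join " " ((ws.drop i).take (lo - i))]
         else midLoop n (ws.drop lo) (B ++ [PySem.Str.join " " ((ws.drop i).take (lo - i))]) [] 0) := by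
  intro m
  induction m with
  | zero =>
    intro k B hik hklo hm
    have hk : k = lo := by omega
    rw [hk]
    by_cases hend : lo = ws.length
    · rw [if_pos hend]
      rw [hend, List.drop_length, midLoop]
    · rw [if_neg hend]
      have hlt : lo < ws.length := by omega
      have hdrop : ws.drop lo = ws[lo] :: ws.drop (lo + 1) := List.drop_eq_getElem_cons hlt
      have hcur : (ws.drop i).take (lo - i) ≠ [] := by
        simp only [ne_eq, List.take_eq_nil_iff, List.drop_eq_nil_iff]
        omega
      have hnofit : ¬ (sumLen ws lo - sumLen ws i - 1 + 1 + PySem.Str.len ws[lo] ≤ n) := by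
        rcases hmax with h | h
        · exact absurd h hend
        · rw [sumLen_succ ws hlt] at h
          omega
      conv_lhs => rw [hdrop, midLoop]
      rw [if_neg hcur, if_neg hnofit]
      conv_rhs => rw [hdrop, midLoop]
      rw [if_pos rfl]
  | succ m ihm =>
    intro k B hik hklo hm
    have hklt : k < ws.length := by omega
    have hdrop : ws.drop k = ws[k] :: ws.drop (k + 1) := List.drop_eq_getElem_cons hklt
    have hcur : (ws.drop i).take (k - i) ≠ [] := by
      simp only [ne_eq, List.take_eq_nil_iff, List.drop_eq_nil_iff]
      omega
    have hfits : sumLen ws k - sumLen ws i - 1 + 1 + PySem.Str.len ws[k] ≤ n := by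
      have h1 : sumLen ws (k + 1) = sumLen ws k + PySem.Str.len ws[k] + 1 := sumLen_succ ws hklt
      have h2 : sumLen ws (k + 1) ≤ sumLen ws lo := sumLen_mono ws (by omega)
      omega
    conv_lhs => rw [hdrop, midLoop]
    rw [if_neg hcur, if_pos hfits]
    have hextend : (ws.drop i).take (k - i) ++ [ws[k]] = (ws.drop i).take (k + 1 - i) := by
      have hidx : k + 1 - i = (k - i) + 1 := by omega
      rw [hidx, List.take_add_one,
        List.getElem?_eq_getElem (show k - i < (ws.drop i).length by simp; omega)]
      simp only [Option.toList_some]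
      congr 2
      rw [List.getElem_drop]
      congr 1
      omega
    have hlen : sumLen ws k - sumLen ws i - 1 + 1 + PySem.Str.len ws[k]
        = sumLen ws (k + 1) - sumLen ws i - 1 := by
      rw [sumLen_succ ws hklt]; ring
    rw [hextend, hlen]
    exact ihm (k + 1) B (by omega) (by omega) (by omega)

-- the outer loops agree: starting a new bucket at word i
lemma chunk_eq (ws : List String) (n : Int) :
    ∀ fuel i (B : List String), i < ws.length → ws.length - i ≤ fuel →
    midLoop n (ws.drop i) B [] 0 = bGo ws (bPre ws) n B i fuel := by
  intro fuel
  induction fuel with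
  | zero => intro i B h1 h2; omega
  | succ fuel ih =>
    intro i B hi hf
    have hdrop : ws.drop i = ws[i] :: ws.drop (i + 1) := List.drop_eq_getElem_cons hi
    have hget : ws.getD i "" = ws[i] := List.getD_eq_getElem ws "" hi
    rw [bGo, if_pos hi]
    conv_lhs => rw [hdrop, midLoop]
    rw [if_pos rfl, hget]
    by_cases hbig : n < PySem.Str.len ws[i]
    · rw [if_pos hbig, if_pos hbig]
    · rw [if_neg hbig, if_neg hbig]
      have htgt : (bPre ws).getD i 0 + n + 1 = sumLen ws i + n + 1 := by
        rw [bPre_getD ws (by omega)]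
      rw [htgt]
      have hspec := bSearch_spec ws (sumLen ws i + n + 1) (ws.length - (i + 1)) (i + 1)
        ws.length rfl (by omega) (le_refl _)
        (by rw [sumLen_succ ws hi]; omega) (Or.inl rfl)
      set lo := bSearch (bPre ws) (sumLen ws i + n + 1) (i + 1) ws.length with hlodef
      obtain ⟨hlo1, hlo2, hlo3, hlo4⟩ := hspec
      have hslice : PySem.List.slice ws (some (i : Int)) (some (lo : Int))
          = (ws.drop i).take (lo - i) := PySem.List.slice_natCast ws i lo
      have hone : [ws[i]] = (ws.drop i).take (i + 1 - i) := by
        rw [show i + 1 - i = 1 from by omega]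
        rw [hdrop]
        rfl
      have hlen1 : PySem.Str.len ws[i] = sumLen ws (i + 1) - sumLen ws i - 1 := by
        rw [sumLen_succ ws hi]; ring
      rw [hone, hlen1]
      rw [fill ws n i lo (by omega) hlo2 hlo3 hlo4 (lo - (i + 1)) (i + 1) B (by omega)
        (by omega) rfl]
      by_cases hend : lo = ws.length
      · rw [if_pos hend, hslice]
        exact (bGo_at_end ws (bPre ws) n _ (by omega) fuel).symm
      · rw [if_neg hend, hslice]
        exact ih lo _ (by omega) (by omega)

-- ===== VERDICT (by name: the statement is the Claim_ definition above) =====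
theorem split_into_buckets_spec : Claim_equal_split_into_buckets := by
  intro phrase n _
  unfold Spec_split_into_buckets split_into_buckets split_into_buckets_alt
  have h := loop_eq (PySem.Str.split₀ phrase) n (split₀_words_ne_nil phrase)
    ((PySem.Str.split₀ phrase).length) 0 (2 * (PySem.Str.split₀ phrase).length + 1)
    (by omega) (by omega) (by omega) [] [] (by simp)
  rw [join_nil_str] at h
  have hz : PySem.Str.len "" = 0 := by simp [PySem.Str.len_eq]
  rw [hz] at h
  simp only [List.drop_zero] at h
  rw [h]
  by_cases hnil : PySem.Str.split₀ phrase = []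
  · rw [if_pos hnil, hnil, midLoop, join_nil_str]
    rfl
  · rw [if_neg hnil]
    have hlen : 0 < (PySem.Str.split₀ phrase).length := List.length_pos_iff.mpr hnil
    have := chunk_eq (PySem.Str.split₀ phrase) n ((PySem.Str.split₀ phrase).length) 0 []
      hlen (by omega)
    simpa using this
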